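-- pv_equiv track=rewrite | github.com/ShreevarGuptaa/YSP_SHREEVAR | Puzzle_Heist_2.py | round2
-- ===== SOURCE A (Python) =====
-- def digit_root(n):
--     while n > 9:
--         s = 0
--         for d in str(n):
--             s += int(d)
--         n = s
--     return n
--
-- def round2(sentence):
--     sentence_clean = ""
--     for ch in sentence:
--         if ch not in [',', '.']:
--             sentence_clean += ch
--
--     words = sentence_clean.split()
--
--     vowels = set(['a', 'e', 'i', 'o', 'u', 'A', 'E', 'I', 'O', 'U'])
--
--     m = 0
--     for w in words:
--         if len(w) < 5:
--             m += 1
--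
--     n = 1
--     for w in words:
--         if len(w) > 5:
--             n += 1
--
--     nth_word = words[n-1]
--     nth_word_reversed = ""
--     for i in range(len(nth_word)-1, -1, -1):
--         nth_word_reversed += nth_word[i]
--
--     mth_word = words[m-1]
--     mth_word_no_vowels = ""
--     for ch in mth_word:
--         if ch not in vowels:
--             mth_word_no_vowels += ch
--
--     combined = nth_word_reversed + mth_word_no_vowels
--
--     return digit_root(len(combined))
-- ===== SOURCE B (Python) =====
-- def round2(sentence):
--     punct = {',', '.'}
--     cleaned = ''.join(ch for ch in sentence if ch not in punct)
--     words = cleaned.split()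
--
--     vowels = set('aeiouAEIOU')
--
--     m = sum(1 for w in words if len(w) < 5)
--     n = 1 + sum(1 for w in words if len(w) > 5)
--
--     # reversal preserves length, so only the lengths are needed
--     combined_len = len(words[n - 1]) + sum(1 for ch in words[m - 1] if ch not in vowels)
--
--     # closed-form digital root (combined_len >= 1 always, since words are non-empty)
--     return 1 + (combined_len - 1) % 9
-- ===== Notes on version B (the rewrite author's own statement) =====
-- stated objective: simpler
-- what changed: B never builds the reversed word, the vowel-stripped word or their concatenation and has no digit-sum loop: it counts lengths directly (reversal preserves length) and replaces the whole digit_root while-loop by the closed-form digital root 1 + (L-1) % 9.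
import Mathlib
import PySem

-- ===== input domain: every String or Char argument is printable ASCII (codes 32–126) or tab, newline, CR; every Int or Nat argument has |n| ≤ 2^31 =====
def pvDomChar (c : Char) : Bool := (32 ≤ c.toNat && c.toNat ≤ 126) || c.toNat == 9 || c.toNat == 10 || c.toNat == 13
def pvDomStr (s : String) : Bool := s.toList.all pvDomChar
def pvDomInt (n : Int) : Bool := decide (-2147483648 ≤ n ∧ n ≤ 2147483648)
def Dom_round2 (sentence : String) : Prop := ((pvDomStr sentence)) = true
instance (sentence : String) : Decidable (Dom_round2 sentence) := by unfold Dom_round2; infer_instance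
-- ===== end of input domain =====

-- B keeps the cleaning/split/counting but computes only the combined LENGTH (reversal preserves
-- length) and replaces the digit-root loop by the closed form 1 + (L-1) % 9; simpler, no speed claim.

-- ===== PORT A =====
-- A-side helpers: the decimal digit sum of n (proof-side characterisation needed to justify
-- termination of the digit_root while-loop) …

def pvDsum (n : Nat) : Nat :=
  if _h : n < 10 then n else pvDsum (n / 10) + n % 10
decreasing_by exact Nat.div_lt_self (by omega) (by omega)

-- … and the port of digit_root's inner 'for d in str(n): s += int(d)' loop.
def pvDigitSum (n : Int) : Int :=
  (PySem.Int.toChars n).foldl (fun s d => s + (PySem.Int.ofChars? [d]).getD 0) 0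

theorem pvDsumLe (n : Nat) : pvDsum n ≤ n := by
  induction n using Nat.strong_induction_on with
  | _ n ih =>
    rw [pvDsum]; split_ifs with h
    · exact le_refl n
    · have := ih (n / 10) (by omega); omega

def pvDecChars (n : Nat) : List Char :=
  if _h : n / 10 = 0 then [Nat.digitChar (n % 10)]
  else pvDecChars (n / 10) ++ [Nat.digitChar (n % 10)]
decreasing_by exact Nat.div_lt_self (by omega) (by omega)

theorem pvToDigitsCore_eq (fuel : Nat) : ∀ (n : Nat) (ds : List Char), n < fuel →
    Nat.toDigitsCore 10 fuel n ds = pvDecChars n ++ ds := by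
  induction fuel with
  | zero => intro n ds h; omega
  | succ fuel ih =>
    intro n ds h
    rw [Nat.toDigitsCore, pvDecChars]
    by_cases h0 : n / 10 = 0
    · simp [h0]
    · simp only [h0, if_false]
      rw [ih (n / 10) _ (by omega)]
      simp

theorem pvValDigitChar (d : Nat) (h : d < 10) :
    (PySem.Int.ofChars? [Nat.digitChar d]).getD 0 = (d : Int) := by
  interval_cases d <;> decide

theorem pvSumDecChars (n : Nat) :
    ((pvDecChars n).map (fun d => (PySem.Int.ofChars? [d]).getD 0)).sum = (pvDsum n : Int) := by
  induction n using Nat.strong_induction_on with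
  | _ n ih =>
    rw [pvDecChars, pvDsum]
    by_cases h0 : n / 10 = 0
    · rw [dif_pos h0, dif_pos (show n < 10 by omega)]
      simp only [List.map_cons, List.map_nil, List.sum_cons, List.sum_nil, add_zero]
      rw [pvValDigitChar (n % 10) (by omega)]
      omega
    · rw [dif_neg h0, dif_neg (show ¬ n < 10 by omega)]
      simp only [List.map_append, List.sum_append, List.map_cons, List.map_nil,
        List.sum_cons, List.sum_nil]
      rw [ih (n / 10) (by omega), pvValDigitChar (n % 10) (by omega)]
      push_cast; ring

theorem pvDigitSumNat (m : Nat) : pvDigitSum (m : Int) = (pvDsum m : Int) := by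
  have h1 : PySem.Int.toChars (m : Int) = pvDecChars m := by
    rw [PySem.Int.toChars, if_neg (by omega)]
    have : ((m : Int)).toNat = m := by omega
    rw [this, Nat.toDigits, pvToDigitsCore_eq (m + 1) m [] (by omega)]
    simp
  rw [pvDigitSum, h1, PySem.List.foldl_add, pvSumDecChars]
  simp

theorem pvDigitSumLt (n : Int) (h : 9 < n) : (pvDigitSum n).toNat < n.toNat := by
  have hm : n = ((n.toNat : Nat) : Int) := by omega
  rw [hm, pvDigitSumNat]
  have h10 : 10 ≤ n.toNat := by omega
  have hlt : pvDsum n.toNat < n.toNat := by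
    rw [pvDsum, dif_neg (show ¬ n.toNat < 10 by omega)]
    have := pvDsumLe (n.toNat / 10); omega
  omega

-- port of digit_root (the while-loop as recursion; pvDigitSumLt justifies termination)
def pvDigitRoot (n : Int) : Int :=
  if h : 9 < n then pvDigitRoot (pvDigitSum n) else n
termination_by n.toNat
decreasing_by exact pvDigitSumLt n h

def round2 (sentence : String) : Int :=
  let sentence_clean : List Char :=
    sentence.toList.foldl
      (fun acc ch => if !([',', '.'].contains ch) then acc ++ [ch] else acc) []
  let words : List (List Char) := PySem.Chars.split₀ sentence_clean
  let vowels : PySem.Set Char := PySem.Set.ofList ['a','e','i','o','u','A','E','I','O','U']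
  let m : Int := words.foldl (fun m w => if decide (w.length < 5) then m + 1 else m) 0
  let n : Int := words.foldl (fun n w => if decide (5 < w.length) then n + 1 else n) 1
  let nth_word : List Char := PySem.List.pyGetD words (n - 1) []
  let nth_word_reversed : List Char :=
    (PySem.List.pyRange ((nth_word.length : Int) - 1) (-1) (-1)).foldl
      (fun acc i => acc ++ [(PySem.List.pyGet? nth_word i).getD ' ']) []
  let mth_word : List Char := PySem.List.pyGetD words (m - 1) []
  let mth_word_no_vowels : List Char :=
    mth_word.foldl (fun acc ch => if !(PySem.Set.contains vowels ch) then acc ++ [ch] else acc) []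
  let combined := nth_word_reversed ++ mth_word_no_vowels
  pvDigitRoot ((combined.length : Int))

-- ===== PORT B =====
def round2_alt (sentence : String) : Int :=
  let punct : PySem.Set Char := PySem.Set.ofList [',', '.']
  let cleaned : List Char := sentence.toList.filter (fun ch => !(PySem.Set.contains punct ch))
  let words : List (List Char) := PySem.Chars.split₀ cleaned
  let vowels : PySem.Set Char := PySem.Set.ofList ['a','e','i','o','u','A','E','I','O','U']
  let m : Int := (words.countP (fun w => decide (w.length < 5)) : Int)
  let n : Int := 1 + (words.countP (fun w => decide (5 < w.length)) : Int)
  let combined_len : Int :=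
    ((PySem.List.pyGetD words (n - 1) []).length : Int)
      + ((PySem.List.pyGetD words (m - 1) []).countP (fun ch => !(PySem.Set.contains vowels ch)) : Int)
  1 + PySem.Int.mod (combined_len - 1) 9

-- ===== PRECONDITION & SPEC =====
-- A raises IndexError (words[n-1]) exactly when every word of the cleaned sentence is longer than
-- 5 characters — including the no-words case; those inputs are excluded (B raises there too).
def Pre_round2 (sentence : String) : Prop :=
  (PySem.Chars.split₀ (sentence.toList.filter (fun ch => !([',', '.'].contains ch)))).countP
      (fun w => decide (5 < w.length))
    < (PySem.Chars.split₀ (sentence.toList.filter (fun ch => !([',', '.'].contains ch)))).length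
instance (sentence : String) : Decidable (Pre_round2 sentence) := by unfold Pre_round2; infer_instance

def pvWitness_round2 : String := "ab cd"

def Spec_round2 (sentence : String) (out : Int) : Prop := out = round2_alt sentence
instance (sentence : String) (out : Int) : Decidable (Spec_round2 sentence out) := by unfold Spec_round2; infer_instance

-- ===== CLAIM (what is proved, stated in full; the proofs are below) =====
def Claim_equal_round2 : Prop := ∀ (sentence : String), Dom_round2 sentence → Pre_round2 sentence → Spec_round2 sentence (round2 sentence)

-- ===== LEMMAS AND PROOFS =====

theorem pvDsumMod9 (n : Nat) : pvDsum n % 9 = n % 9 := by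
  induction n using Nat.strong_induction_on with
  | _ n ih =>
    rw [pvDsum]; split_ifs with h
    · rfl
    · have := ih (n / 10) (by omega); omega

theorem pvDsumPos (n : Nat) (h : 1 ≤ n) : 1 ≤ pvDsum n := by
  induction n using Nat.strong_induction_on with
  | _ n ih =>
    rw [pvDsum]; split_ifs with h10
    · omega
    · rcases Nat.eq_zero_or_pos (n % 10) with h0 | h0
      · have := ih (n / 10) (by omega) (by omega); omega
      · omega

theorem pvDigitRootClosed (m : Nat) (h : 1 ≤ m) :
    pvDigitRoot (m : Int) = 1 + PySem.Int.mod ((m : Int) - 1) 9 := by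
  induction m using Nat.strong_induction_on with
  | _ m ih =>
    rw [pvDigitRoot, PySem.Int.mod_eq_emod_of_pos (by norm_num)]
    by_cases h9 : 9 < (m : Int)
    · rw [dif_pos h9, pvDigitSumNat]
      rw [ih (pvDsum m) (by { rw [pvDsum, dif_neg (show ¬ m < 10 by omega)]
                              have := pvDsumLe (m / 10); omega })
            (pvDsumPos m h), PySem.Int.mod_eq_emod_of_pos (by norm_num)]
      have := pvDsumMod9 m
      omega
    · rw [dif_neg h9]
      omega

theorem pvSplitGoNeNil (s : List Char) : ∀ (cur : List Char) (acc : List (List Char)),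
    (∀ a ∈ acc, a ≠ []) → ∀ w ∈ PySem.Chars.split₀.go s cur acc, w ≠ [] := by
  induction s with
  | nil =>
    intro cur acc hacc w hw
    rw [PySem.Chars.split₀.go] at hw
    split_ifs at hw with hcur
    · exact hacc w (List.mem_reverse.mp hw)
    · rcases List.mem_cons.mp (List.mem_reverse.mp hw) with h | h
      · subst h; simpa using (by simpa [List.isEmpty_iff] using hcur)
      · exact hacc w h
  | cons c rest ih =>
    intro cur acc hacc w hw
    rw [PySem.Chars.split₀.go] at hw
    split_ifs at hw with hsp hcur
    · exact ih [] acc hacc w hw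
    · refine ih [] (cur.reverse :: acc) ?_ w hw
      intro a ha
      rcases List.mem_cons.mp ha with h | h
      · subst h; simpa using (by simpa [List.isEmpty_iff] using hcur)
      · exact hacc a h
    · exact ih (c :: cur) acc hacc w hw

theorem pvSplitNeNil (s : List Char) : ∀ w ∈ PySem.Chars.split₀ s, w ≠ [] := by
  intro w hw
  exact pvSplitGoNeNil s [] [] (by simp) w hw

theorem pvRangeRevLen (L : Nat) :
    (PySem.List.pyRange ((L : Int) - 1) (-1) (-1)).length = L := by
  rw [PySem.List.pyRange]
  rcases Nat.eq_zero_or_pos L with h0 | h0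
  · subst h0; simp
  · rw [if_neg (by norm_num)]
    simp only [List.length_map, List.length_range]
    rw [if_neg (by norm_num), if_pos (by omega)]
    have : ((L : Int) - 1 - (-1) + - (-1) - 1) / (- (-1)) = (L : Int) := by
      norm_num
    omega

theorem pvFinal (a b : Nat) (ha : 1 ≤ a) :
    pvDigitRoot (((a + b : Nat) : Int)) = 1 + PySem.Int.mod ((a : Int) + (b : Int) - 1) 9 := by
  rw [pvDigitRootClosed (a + b) (by omega)]
  push_cast
  rfl

-- ===== VERDICT (by name: the statement is the Claim_ definition above) =====
theorem round2_spec : Claim_equal_round2 := by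
  intro s _hdom hpre
  unfold Pre_round2 at hpre
  unfold Spec_round2 round2 round2_alt
  have hpunct : PySem.Set.ofList [',', '.'] = [',', '.'] := by decide
  simp only [PySem.List.foldl_append_if, PySem.List.foldl_count_if,
    PySem.List.foldl_append_singleton_eq_map, List.nil_append, List.map_id',
    zero_add, List.length_append, List.length_map, pvRangeRevLen] at hpre ⊢
  simp only [hpunct, PySem.Set.contains, ← List.countP_eq_length_filter] at hpre ⊢
  set words := PySem.Chars.split₀ (List.filter (fun x => ! [',', '.'].contains x) s.toList)
    with hwords
  set cp5 := List.countP (fun x => decide (5 < x.length)) words with hcp5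
  set nth := PySem.List.pyGetD words (1 + (cp5 : Int) - 1) [] with hnth
  have hin : PySem.Raise.InRange words.length (1 + (cp5 : Int) - 1) := ⟨by omega, by omega⟩
  have hne : nth ≠ [] := pvSplitNeNil _ nth (PySem.List.pyGetD_mem words [] hin)
  have hlen : 1 ≤ nth.length := List.length_pos_iff.mpr hne
  exact pvFinal _ _ hlen
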